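-- pv_equiv track=rewrite | github.com/strangecamelcaselogin/barcode_reader | barcode_reader.py | get_raw_barcode
-- ===== SOURCE A (Python) =====
-- def get_raw_barcode(derivative, threshold):
--     """
--     Ищем отрезок, образованный порогом на производной,
--     считаем его середину, ищем следующий и его середину
--     и вычисляем расстояние между ними, их тип (черный белый)
--
--     черный == -1
--     белый == 1
--     """
--
--     raw_barcode = []
--     peak, prev_peak = 0, 0  # Точки пика и предыдущего пика
--     start, end = 0, 0  # Точка начала и конца роста производной выше порога
--     peak_state = 0
--     find_peak = False
--
--     peaks_for_debug = []
--     p_value = 0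
--     for index, value in enumerate(derivative):
--         if abs(value) > threshold:  # Если мы наткнулись на рост производной выше порога.
--             if find_peak:  # В очередной раз.
--                 end += 1
--
--             else:  # В первый раз.
--                 find_peak = True
--                 start = index
--                 end = index
--                 peak_state = 1 if value > 0 else -1
--
--         else:  # Если значение  производной не превышает порога.
--             find_peak = False
--             if abs(p_value) > threshold:
--                 peak = (index - 1) - round(((end + 1) - start) / 2)  # MAGIC round - int, +1 +0
--                 peaks_for_debug.append(peak)
--                 if prev_peak != 0:
--                     raw_barcode.append((peak_state, peak - prev_peak + 1))
--
--                 prev_peak = peak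
--
--         p_value = value
--
--     return raw_barcode, peaks_for_debug
-- ===== SOURCE B (Python) =====
-- def get_raw_barcode(derivative, threshold):
--     # Two-phase version: first collect closed runs of above-threshold values,
--     # then compute peaks and distances over the run list (integer half-even rounding).
--     runs = []
--     cur = None  # (start_index, state) of the currently open run
--     for i, v in enumerate(derivative):
--         if abs(v) > threshold:
--             if cur is None:
--                 cur = (i, 1 if v > 0 else -1)
--         else:
--             if cur is not None:
--                 runs.append((cur[0], i - 1, cur[1]))
--                 cur = None
--     # a run still open at the end of the array yields no peak
--
--     raw_barcode = []
--     peaks = []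
--     prev = 0
--     for s, e, state in runs:
--         length = e + 1 - s
--         r = length // 2
--         if length % 2 == 1 and r % 2 == 1:
--             r += 1  # round-half-to-even, as round(length / 2) does
--         peak = e - r
--         peaks.append(peak)
--         if prev != 0:
--             raw_barcode.append((state, peak - prev + 1))
--         prev = peak
--     return raw_barcode, peaks
-- ===== Notes on version B (the rewrite author's own statement) =====
-- stated objective: alternative
-- what changed: Replaces A's single stateful loop (find_peak/start/end/p_value flags with float round()) by a two-phase version: collect the closed above-threshold runs first, then compute peaks and distances in a separate fold over the run list using integer half-to-even rounding.
import Mathlib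
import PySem

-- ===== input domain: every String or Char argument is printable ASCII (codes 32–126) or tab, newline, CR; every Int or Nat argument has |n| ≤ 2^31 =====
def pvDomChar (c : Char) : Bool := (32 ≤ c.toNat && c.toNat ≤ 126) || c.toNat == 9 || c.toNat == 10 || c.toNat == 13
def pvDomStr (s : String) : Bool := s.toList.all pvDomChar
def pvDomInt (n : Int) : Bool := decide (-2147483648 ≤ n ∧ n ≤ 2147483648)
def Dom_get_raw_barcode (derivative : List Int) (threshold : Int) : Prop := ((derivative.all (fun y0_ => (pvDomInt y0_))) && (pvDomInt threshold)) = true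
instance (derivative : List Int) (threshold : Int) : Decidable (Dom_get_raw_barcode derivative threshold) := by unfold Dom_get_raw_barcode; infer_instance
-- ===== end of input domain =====

-- B re-implements get_raw_barcode in two phases (collect closed runs, then fold over the run
-- list with integer half-even rounding) instead of A's single stateful loop; objective: alternative.


-- ===== PORT A =====

-- round(a / 2) for an int a, hand-ported (exact: a/2 is a float with an exact value here,
-- and Python rounds half to even)
def pyRoundHalf (a : Int) : Int :=
  let k := PySem.Int.floordiv a 2
  if PySem.Int.mod a 2 == 0 then k else if PySem.Int.mod k 2 == 0 then k else k + 1

structure AState where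
  raw : List (Int × Int)
  peak : Int
  prev_peak : Int
  start : Int
  end_ : Int
  peak_state : Int
  find_peak : Bool
  peaks : List Int
  p_value : Int
deriving Repr, DecidableEq

def aLoop (th : Int) : List Int → Int → AState → AState
  | [], _, st => st
  | v :: rest, i, st =>
    let st' :=
      if |v| > th then
        if st.find_peak then { st with end_ := st.end_ + 1 }
        else { st with find_peak := true, start := i, end_ := i,
                       peak_state := if v > 0 then 1 else -1 }
      else
        let st1 := { st with find_peak := false }
        if |st1.p_value| > th then
          let peak : Int := (i - 1) - pyRoundHalf ((st1.end_ + 1) - st1.start)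
          let st2 := { st1 with peak := peak, peaks := st1.peaks ++ [peak] }
          let st3 := if st2.prev_peak ≠ (0:Int) then
              { st2 with raw := st2.raw ++ [(st2.peak_state, peak - st2.prev_peak + 1)] }
            else st2
          { st3 with prev_peak := peak }
        else st1
    aLoop th rest (i + 1) { st' with p_value := v }

def get_raw_barcode (derivative : List Int) (threshold : Int) : (List (Int × Int)) × List Int :=
  let st := aLoop threshold derivative 0 ⟨[], 0, 0, 0, 0, 0, false, [], 0⟩
  (st.raw, st.peaks)

-- ===== PORT B =====

-- phase 1: collect the closed runs (start, end, state) of above-threshold values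
def bRuns (th : Int) : List Int → Int → Option (Int × Int) → List (Int × Int × Int) → List (Int × Int × Int)
  | [], _, _, acc => acc
  | v :: rest, i, cur, acc =>
    if |v| > th then
      match cur with
      | none => bRuns th rest (i + 1) (some (i, if v > 0 then 1 else -1)) acc
      | some c => bRuns th rest (i + 1) (some c) acc
    else
      match cur with
      | none => bRuns th rest (i + 1) none acc
      | some (s, state) => bRuns th rest (i + 1) none (acc ++ [(s, i - 1, state)])

-- phase 2: one run → peak + distance; state is (prev, raw_barcode, peaks)
def bStep (acc : Int × List (Int × Int) × List Int) (run : Int × Int × Int) :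
    Int × List (Int × Int) × List Int :=
  let (prev, raw, peaks) := acc
  let (s, e, state) := run
  let length := e + 1 - s
  let r0 := PySem.Int.floordiv length 2
  let r := if PySem.Int.mod length 2 == 1 ∧ PySem.Int.mod r0 2 == 1 then r0 + 1 else r0
  let peak := e - r
  let raw' := if prev ≠ 0 then raw ++ [(state, peak - prev + 1)] else raw
  (peak, raw', peaks ++ [peak])

def get_raw_barcode_alt (derivative : List Int) (threshold : Int) : (List (Int × Int)) × List Int :=
  let runs := bRuns threshold derivative 0 none []
  let res := runs.foldl bStep (0, [], [])
  (res.2.1, res.2.2)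

-- ===== PRECONDITION & SPEC =====
def Spec_get_raw_barcode (derivative : List Int) (threshold : Int) (out : (List (Int × Int)) × List Int) : Prop := out = get_raw_barcode_alt derivative threshold
instance (derivative : List Int) (threshold : Int) (out : (List (Int × Int)) × List Int) : Decidable (Spec_get_raw_barcode derivative threshold out) := by unfold Spec_get_raw_barcode; infer_instance

-- ===== CLAIM (what is proved, stated in full; the proofs are below) =====
def Claim_equal_get_raw_barcode : Prop := ∀ (derivative : List Int) (threshold : Int), Dom_get_raw_barcode derivative threshold → Spec_get_raw_barcode derivative threshold (get_raw_barcode derivative threshold)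

-- ===== LEMMAS AND PROOFS =====

-- B's integer rounding equals A's pyRoundHalf
lemma bStep_r_eq (L : Int) :
    (if PySem.Int.mod L 2 == 1 ∧ PySem.Int.mod (PySem.Int.floordiv L 2) 2 == 1
     then PySem.Int.floordiv L 2 + 1 else PySem.Int.floordiv L 2) = pyRoundHalf L := by
  have h2 : (0:Int) < 2 := by omega
  have hm := PySem.Int.mod_nonneg L h2
  have hl := PySem.Int.mod_lt L h2
  have hm2 := PySem.Int.mod_nonneg (PySem.Int.floordiv L 2) h2
  have hl2 := PySem.Int.mod_lt (PySem.Int.floordiv L 2) h2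
  unfold pyRoundHalf
  split_ifs <;> simp_all <;> try omega

-- accumulator lemma for bRuns
lemma bRuns_acc (th : Int) (l : List Int) : ∀ (i : Int) (cur : Option (Int × Int)) (acc : List (Int × Int × Int)),
    bRuns th l i cur acc = acc ++ bRuns th l i cur [] := by
  induction l with
  | nil => intro i cur acc; simp [bRuns]
  | cons v rest ih =>
    intro i cur acc
    cases cur with
    | none =>
      simp only [bRuns]
      split_ifs with hv <;> rw [ih]
    | some c =>
      obtain ⟨s, state⟩ := c
      simp only [bRuns]
      split_ifs with hv
      · rw [ih]
      · rw [ih (i+1) none (acc ++ [(s, i-1, state)]), ih (i+1) none ([] ++ [(s, i-1, state)])]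
        simp

-- the correspondence between A's loop state and B's open run
def StInv (th : Int) (st : AState) (i : Int) (cur : Option (Int × Int)) : Prop :=
  match cur with
  | none => st.find_peak = false ∧ (|st.p_value| ≤ th ∨ th < 0)
  | some (s, ps) => st.find_peak = true ∧ st.start = s ∧ st.end_ = i - 1 ∧
      st.peak_state = ps ∧ |st.p_value| > th

lemma main_inv (th : Int) (l : List Int) : ∀ (i : Int) (st : AState) (cur : Option (Int × Int)),
    StInv th st i cur →
    ((aLoop th l i st).raw, (aLoop th l i st).peaks)
      = (let res := (bRuns th l i cur []).foldl bStep (st.prev_peak, st.raw, st.peaks)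
         (res.2.1, res.2.2)) := by
  induction l with
  | nil =>
    intro i st cur _
    cases cur with
    | none => simp [aLoop, bRuns]
    | some c => obtain ⟨s, ps⟩ := c; simp [aLoop, bRuns]
  | cons v rest ih =>
    intro i st cur hinv
    simp only [aLoop, bRuns, List.nil_append]
    by_cases hv : |v| > th
    · simp only [hv, if_true]
      cases cur with
      | none =>
        obtain ⟨hfp, _⟩ := hinv
        simp only [hfp, Bool.false_eq_true, if_false]
        exact ih (i + 1) _ (some (i, if v > 0 then 1 else -1))
          ⟨rfl, rfl, show (i:Int) = i + 1 - 1 by omega, rfl, show |v| > th from hv⟩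
      | some c =>
        obtain ⟨s, ps⟩ := c
        obtain ⟨hfp, hs, he, hps, _⟩ := hinv
        simp only [hfp, if_true]
        exact ih (i + 1) _ (some (s, ps))
          ⟨rfl, hs, show st.end_ + 1 = i + 1 - 1 by omega, hps, show |v| > th from hv⟩
    · simp only [hv, if_false]
      cases cur with
      | none =>
        obtain ⟨hfp, hp⟩ := hinv
        have hple : |st.p_value| ≤ th := by
          rcases hp with h | h
          · exact h
          · exfalso; have := abs_nonneg v; omega
        have hnp : ¬ (|st.p_value| > th) := by omega
        simp only [hnp, if_false]
        exact ih (i + 1) _ none ⟨rfl, Or.inl (show |v| ≤ th by omega)⟩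
      | some c =>
        obtain ⟨s, ps⟩ := c
        obtain ⟨hfp, hs, he, hps, hpv⟩ := hinv
        simp only [hpv, if_true]
        rw [bRuns_acc th rest (i+1) none [(s, i-1, ps)]]
        rw [List.foldl_append]
        have hstep : bStep (st.prev_peak, st.raw, st.peaks) (s, i - 1, ps)
            = ((i - 1) - pyRoundHalf ((st.end_ + 1) - st.start),
               (if st.prev_peak ≠ (0:Int) then
                  st.raw ++ [(st.peak_state, ((i - 1) - pyRoundHalf ((st.end_ + 1) - st.start)) - st.prev_peak + 1)]
                else st.raw),
               st.peaks ++ [(i - 1) - pyRoundHalf ((st.end_ + 1) - st.start)]) := by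
          simp only [bStep, hs, he, hps]
          rw [show (i - 1 + 1 - s) = ((st.end_ + 1) - st.start) by omega]
          rw [bStep_r_eq]
        rw [List.foldl_cons, List.foldl_nil, hstep]
        split_ifs with hprev <;>
          exact ih (i + 1) _ none ⟨rfl, Or.inl (show |v| ≤ th by omega)⟩

-- ===== VERDICT (by name: the statement is the Claim_ definition above) =====
theorem get_raw_barcode_spec : Claim_equal_get_raw_barcode := by
  intro derivative threshold _
  unfold Spec_get_raw_barcode get_raw_barcode get_raw_barcode_alt
  exact main_inv threshold derivative 0 ⟨[], 0, 0, 0, 0, 0, false, [], 0⟩ none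
    ⟨rfl, by rw [show |(0:Int)| = 0 from abs_zero]; omega⟩
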